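-- pv_equiv track=rewrite | github.com/zicongmo/stable-marriage | stable_marriage_csv.py | match_no_preference
-- ===== SOURCE A (Python) =====
-- def match_no_preference(group1, group2, max_to_scan = 5):
--     """
--     Produces matches (G1, G2) between group1 and group2 that satisfy the following criteria:
--     1. G1 has no member of group2 in their preference list
--     2. G2 has member G1 in their top max_to_scan
--
--     Priority over no-preference group1 members is given to group2 members that have them as higher preference.
--     For instance, if G1 has no member of group2 in their top 5, and G has G1 as their top 2 but G' has G1 as their top,
--         then G1 is matched with G' instead of G.
--
--     Parameters
--     --------------------
--     group1: List of the preference list of all group1 members (name is element 0 of each row)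
--     group2: List of the preference list of all group2 members (name is element 0 of each row)
--     max_to_scan: Integer describing how far down the preference lists to look for matching members
--
--     Returns
--     --------------------
--     List of pairings as described above
--     """
--     # Determine which members of group1 have no members of group2 in preference list
--     # Index 0 is the member name, Index 1+ is the preference list
--     no_preference_members = []
--     for preference_list in group1:
--         if len(preference_list[1:]) == 0:
--             no_preference_members.append(preference_list[0])
--
--     # Determine if any members of group2 want these no preference members
--     # First scan if any group2 members have them as first, then second, etc.
--     no_preference_pairings = []
--     for i in range(1, max_to_scan):
--         # List of preference i pairings, (group2, group1)
--         # This can be one-lined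
--         preference_i_pairings = []
--         for row in group2:
--             # member name is index 0, preference i is index i
--             if len(row) > i:
--                 preference_i_pairings.append((row[0], row[i]))
--         for pairing in preference_i_pairings:
--             if pairing[1] in no_preference_members:
--                 no_preference_pairings.append([pairing[1], pairing[0]])
--                 # pairing[1] is now matched, remove from the list of no preference
--                 no_preference_members.remove(pairing[1])
--
--     return no_preference_pairings
-- ===== SOURCE B (Python) =====
-- def match_no_preference(group1, group2, max_to_scan=5):
--     # Collect the no-preference group1 names once, as a multiset (duplicates kept).
--     members = [row[0] for row in group1 if len(row) <= 1]
--     counts = {}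
--     for name in members:
--         counts[name] = counts.get(name, 0) + 1
--     # One pass over group2: every valid offer (preference position i, group2 index j).
--     offers = []
--     for j, row in enumerate(group2):
--         for i in range(1, min(len(row), max_to_scan)):
--             offers.append((i, j, row[0], row[i]))
--     # A's processing order is position-major, then group2 order.
--     offers.sort(key=lambda t: (t[0], t[1]))
--     result = []
--     for i, j, g2name, member in offers:
--         if counts.get(member, 0) > 0:
--             result.append([member, g2name])
--             counts[member] -= 1
--     return result
-- ===== Notes on version B (the rewrite author's own statement) =====
-- stated objective: alternative
-- what changed: Instead of rescanning group2 once per preference position and doing O(n) list membership and removal per offer, B makes one pass over group2 collecting all valid offers, sorts them by (position, group2 index) to recover A's processing order, and consumes them against a count dictionary of the no-preference names.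
import Mathlib
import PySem

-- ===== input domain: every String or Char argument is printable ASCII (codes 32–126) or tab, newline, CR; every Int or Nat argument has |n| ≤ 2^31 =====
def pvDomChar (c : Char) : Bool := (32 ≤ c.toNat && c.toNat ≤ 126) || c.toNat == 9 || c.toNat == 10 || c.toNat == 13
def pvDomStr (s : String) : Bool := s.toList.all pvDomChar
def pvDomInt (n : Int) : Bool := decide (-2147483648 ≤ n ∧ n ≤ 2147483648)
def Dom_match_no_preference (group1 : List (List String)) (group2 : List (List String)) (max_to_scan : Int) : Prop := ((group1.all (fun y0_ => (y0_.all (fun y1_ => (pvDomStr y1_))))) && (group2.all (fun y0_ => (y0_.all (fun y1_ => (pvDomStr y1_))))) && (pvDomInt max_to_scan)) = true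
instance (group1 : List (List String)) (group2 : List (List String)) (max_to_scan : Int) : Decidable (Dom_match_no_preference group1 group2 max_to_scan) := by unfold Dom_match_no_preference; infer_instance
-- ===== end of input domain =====

-- B replaces A's position-by-position rescan of group2 (with list membership/removal) by one
-- pass collecting all offers, a sort by (position, group2 index), and a count dictionary.

-- ===== PORT A =====
-- transliteration of Source A; row[0] is pyGetD with default "" — the IndexError case (empty row in
-- group1) is excluded by Pre_; remove? always succeeds since membership was just checked.
def match_no_preference (group1 : List (List String)) (group2 : List (List String)) (max_to_scan : Int) : List (List String) :=
  let no_preference_members : List String :=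
    group1.foldl (fun acc row =>
      if (PySem.List.slice row (some 1) none).length = 0 then
        acc ++ [PySem.List.pyGetD row 0 ""]
      else acc) []
  let final :=
    (PySem.List.pyRange 1 max_to_scan 1).foldl (fun st i =>
      let preference_i_pairings : List (String × String) :=
        group2.foldl (fun acc row =>
          if i < (row.length : Int) then
            acc ++ [(PySem.List.pyGetD row 0 "", PySem.List.pyGetD row i "")]
          else acc) []
      preference_i_pairings.foldl (fun st p =>
        if p.2 ∈ st.1 then
          ((PySem.List.remove? st.1 p.2).getD st.1, st.2 ++ [[p.2, p.1]])
        else st) st)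
      (no_preference_members, ([] : List (List String)))
  final.2

-- ===== PORT B =====
-- transliteration of Source B; the tuple sort key (t[0], t[1]) is Python's lexicographic tuple
-- order, i.e. the Lex order on Int × Int; counts[member] -= 1 runs only when the key is
-- present (its count is positive), so modify's default 0 is never used — exact.
def match_no_preference_alt (group1 : List (List String)) (group2 : List (List String)) (max_to_scan : Int) : List (List String) :=
  let members : List String :=
    (group1.filter (fun row => decide (row.length ≤ 1))).map (fun row => PySem.List.pyGetD row 0 "")
  let counts : PySem.Dict String Int :=
    members.foldl (fun d name => d.insert name (d.getD name 0 + 1)) PySem.Dict.empty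
  let offers : List (Int × Int × String × String) :=
    (PySem.List.enumerate group2).foldl (fun acc jr =>
      (PySem.List.pyRange 1 (min ((jr.2.length : Int)) max_to_scan) 1).foldl
        (fun acc2 i => acc2 ++ [(i, jr.1, PySem.List.pyGetD jr.2 0 "", PySem.List.pyGetD jr.2 i "")]) acc) []
  let sortedOffers := PySem.List.sorted offers (fun t => toLex (t.1, t.2.1))
  let final :=
    sortedOffers.foldl (fun st t =>
      if 0 < st.1.getD t.2.2.2 0 then
        (st.1.modify t.2.2.2 0 (· - 1), st.2 ++ [[t.2.2.2, t.2.2.1]])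
      else st)
      (counts, ([] : List (List String)))
  final.2

-- ===== PRECONDITION & SPEC =====
-- Pre_ excludes exactly the inputs where Python A raises: an empty row in group1 makes
-- preference_list[0] an IndexError (B raises there too).
def Pre_match_no_preference (group1 : List (List String)) (_group2 : List (List String)) (_max_to_scan : Int) : Prop :=
  ∀ row ∈ group1, row ≠ []
instance (group1 : List (List String)) (group2 : List (List String)) (max_to_scan : Int) : Decidable (Pre_match_no_preference group1 group2 max_to_scan) := by unfold Pre_match_no_preference; infer_instance
def pvWitness_match_no_preference : List (List String) × List (List String) × Int :=
  ([["a"]], ([["X", "a"], ["Y", "b", "a"]], 3))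

def Spec_match_no_preference (group1 : List (List String)) (group2 : List (List String)) (max_to_scan : Int) (out : List (List String)) : Prop := out = match_no_preference_alt group1 group2 max_to_scan
instance (group1 : List (List String)) (group2 : List (List String)) (max_to_scan : Int) (out : List (List String)) : Decidable (Spec_match_no_preference group1 group2 max_to_scan out) := by unfold Spec_match_no_preference; infer_instance

-- ===== CLAIM (what is proved, stated in full; the proofs are below) =====
def Claim_equal_match_no_preference : Prop := ∀ (group1 : List (List String)) (group2 : List (List String)) (max_to_scan : Int), Dom_match_no_preference group1 group2 max_to_scan → Pre_match_no_preference group1 group2 max_to_scan → Spec_match_no_preference group1 group2 max_to_scan (match_no_preference group1 group2 max_to_scan)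

-- ===== LEMMAS AND PROOFS =====

-- proof-side names for the two loop bodies and the offer key/projection
def pvKey (t : Int × Int × String × String) : Lex (Int × Int) := toLex (t.1, t.2.1)

def pvProj (t : Int × Int × String × String) : String × String := (t.2.2.1, t.2.2.2)

def pvStepA (st : List String × List (List String)) (p : String × String) :
    List String × List (List String) :=
  if p.2 ∈ st.1 then ((PySem.List.remove? st.1 p.2).getD st.1, st.2 ++ [[p.2, p.1]]) else st

def pvStepB (st : PySem.Dict String Int × List (List String)) (t : Int × Int × String × String) :
    PySem.Dict String Int × List (List String) :=
  if 0 < st.1.getD t.2.2.2 0 then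
    (st.1.modify t.2.2.2 0 (· - 1), st.2 ++ [[t.2.2.2, t.2.2.1]])
  else st

-- the canonical offer stream: position-major, then group2 order (A's processing order)
def pvBlock (group2 : List (List String)) (i : Int) : List (Int × Int × String × String) :=
  (PySem.List.enumerate group2).filterMap (fun jr =>
    if i < (jr.2.length : Int) then
      some (i, jr.1, PySem.List.pyGetD jr.2 0 "", PySem.List.pyGetD jr.2 i "")
    else none)

def pvOffersC (group2 : List (List String)) (m : Int) : List (Int × Int × String × String) :=
  (PySem.List.pyRange 1 m 1).flatMap (pvBlock group2)

lemma pv_filterMap_ite_filter {α β : Type} (p : α → Prop) [DecidablePred p] (f : α → β)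
    (l : List α) :
    l.filterMap (fun x => if p x then some (f x) else none)
      = (l.filter (fun x => decide (p x))).map f := by
  induction l with
  | nil => rfl
  | cons x xs ih => by_cases h : p x <;> simp [h, ih]

lemma pv_filterMap_ite_true {α β : Type} (p : α → Prop) [DecidablePred p] (f : α → β)
    (l : List α) (h : ∀ x ∈ l, p x) :
    l.filterMap (fun x => if p x then some (f x) else none) = l.map f := by
  rw [pv_filterMap_ite_filter, List.filter_eq_self.mpr (by simpa using h)]

lemma pv_filterMap_ite_false {α β : Type} (p : α → Prop) [DecidablePred p] (f : α → β)
    (l : List α) (h : ∀ x ∈ l, ¬ p x) :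
    l.filterMap (fun x => if p x then some (f x) else none) = [] := by
  rw [pv_filterMap_ite_filter, List.filter_eq_nil_iff.mpr (by simpa using h)]
  rfl

-- range(1, min(L, m)) mapped = range(1, m) filtered by i < L (a prefix predicate on the range)
lemma pv_range_min_map {α : Type} (L m : Int) (hL : 0 ≤ L) (f : Int → α) :
    (PySem.List.pyRange 1 (min L m) 1).map f
      = (PySem.List.pyRange 1 m 1).filterMap (fun i => if i < L then some (f i) else none) := by
  rcases le_or_gt m 1 with hm | hm
  · rw [PySem.List.pyRange_one_eq_nil ((min_le_right L m).trans hm),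
      PySem.List.pyRange_one_eq_nil hm]
    rfl
  · have hc1 : (1 : Int) ≤ max 1 (min L m) := le_max_left _ _
    have hcm : max 1 (min L m) ≤ m := by omega
    have hL' : PySem.List.pyRange 1 (min L m) 1 = PySem.List.pyRange 1 (max 1 (min L m)) 1 := by
      rcases le_or_gt 1 (min L m) with h | h
      · congr 1
        omega
      · rw [PySem.List.pyRange_one_eq_nil (by omega), PySem.List.pyRange_one_eq_nil (by omega)]
    rw [hL', PySem.List.pyRange_one_append 1 (max 1 (min L m)) m hc1 hcm, List.filterMap_append,
      pv_filterMap_ite_true (fun i => i < L) f _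
        (by intro x hx; rw [PySem.List.mem_pyRange_one] at hx; omega),
      pv_filterMap_ite_false (fun i => i < L) f _
        (by intro x hx; rw [PySem.List.mem_pyRange_one] at hx; omega),
      List.append_nil]

-- a filterMap over enumerate that ignores the index is a filterMap over the list
lemma pv_filterMap_enumerate_snd {α γ : Type} (xs : List α) (s : Int) (g : α → Option γ) :
    (PySem.List.enumerate xs s).filterMap (fun jr => g jr.2) = xs.filterMap g := by
  induction xs generalizing s with
  | nil => rfl
  | cons x xs ih => simp [PySem.List.enumerate_cons, List.filterMap_cons, ih]

-- one cons-step of the flatMap/filterMap transposition, as a permutation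
lemma pv_cons_flatMap_perm {β γ : Type} (ys : List β) (g : β → Option γ) (h : β → List γ) :
    (ys.flatMap (fun y => match g y with | some c => c :: h y | none => h y)).Perm
      (ys.filterMap g ++ ys.flatMap h) := by
  induction ys with
  | nil => rfl
  | cons y ys ih =>
    rw [List.flatMap_cons, List.filterMap_cons, List.flatMap_cons]
    cases hg : g y with
    | none =>
      exact (ih.append_left (h y)).trans (List.perm_append_comm_assoc _ _ _)
    | some c =>
      exact List.Perm.cons c ((ih.append_left (h y)).trans (List.perm_append_comm_assoc _ _ _))

-- the full transposition: row-major and position-major offer streams are permutations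
lemma pv_transpose_perm {α β γ : Type} (xs : List α) (ys : List β) (f : α → β → Option γ) :
    (xs.flatMap fun x => ys.filterMap fun y => f x y).Perm
      (ys.flatMap fun y => xs.filterMap fun x => f x y) := by
  induction xs with
  | nil => simp
  | cons x xs ih =>
    rw [List.flatMap_cons]
    have h2 : (ys.flatMap fun y => (x :: xs).filterMap fun x' => f x' y)
        = ys.flatMap fun y => match f x y with
            | some c => c :: (xs.filterMap fun x' => f x' y)
            | none => xs.filterMap fun x' => f x' y := by
      apply List.flatMap_congr
      intro y _
      rw [List.filterMap_cons]
      cases f x y <;> rfl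
    rw [h2]
    exact ((ih.append_left _).trans (List.Perm.refl _)).trans
      (pv_cons_flatMap_perm ys (fun y => f x y) (fun y => xs.filterMap fun x' => f x' y)).symm

lemma pv_mem_block {group2 : List (List String)} {i : Int} {t : Int × Int × String × String}
    (h : t ∈ pvBlock group2 i) : t.1 = i := by
  unfold pvBlock at h
  rw [List.mem_filterMap] at h
  obtain ⟨jr, _, hjr⟩ := h
  split at hjr
  · cases hjr; rfl
  · cases hjr

lemma pv_block_pairwise (group2 : List (List String)) (i : Int) :
    (pvBlock group2 i).Pairwise (fun a b => pvKey a < pvKey b) := by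
  unfold pvBlock
  rw [List.pairwise_filterMap]
  refine (PySem.List.pairwise_lt_enumerate group2 0).imp ?_
  intro p q hpq b hb b' hb'
  split at hb
  · cases hb
    split at hb'
    · cases hb'
      simp [pvKey, Prod.Lex.toLex_lt_toLex, hpq]
    · cases hb'
  · cases hb

lemma pv_offers_pairwise (group2 : List (List String)) (m : Int) :
    (pvOffersC group2 m).Pairwise (fun a b => pvKey a < pvKey b) := by
  unfold pvOffersC
  rw [List.flatMap_def, List.pairwise_flatten]
  constructor
  · intro l hl
    rw [List.mem_map] at hl
    obtain ⟨i, _, rfl⟩ := hl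
    exact pv_block_pairwise group2 i
  · rw [List.pairwise_map]
    refine (PySem.List.pairwise_lt_pyRange_one 1 m).imp ?_
    intro i j hij x hx y hy
    have hx1 := pv_mem_block hx
    have hy1 := pv_mem_block hy
    simp [pvKey, Prod.Lex.toLex_lt_toLex, hx1, hy1, hij]

-- the consumption loops: a count dictionary simulates the list with membership/remove
lemma pv_consume (offers : List (Int × Int × String × String)) :
    ∀ (np : List String) (d : PySem.Dict String Int) (acc : List (List String)),
      (∀ s, d.getD s 0 = (np.count s : Int)) →
      (offers.foldl pvStepB (d, acc)).2
        = (offers.foldl (fun st t => pvStepA st (pvProj t)) (np, acc)).2 := by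
  induction offers with
  | nil => intro np d acc _; rfl
  | cons t ts ih =>
    intro np d acc h
    rw [List.foldl_cons, List.foldl_cons]
    by_cases hm : t.2.2.2 ∈ np
    · have hc : 0 < np.count t.2.2.2 := List.count_pos_iff.mpr hm
      have hB : 0 < d.getD t.2.2.2 0 := by rw [h]; exact_mod_cast hc
      rw [show pvStepB (d, acc) t = (d.modify t.2.2.2 0 (· - 1), acc ++ [[t.2.2.2, t.2.2.1]]) from
            by simp [pvStepB, hB],
          show pvStepA (np, acc) (pvProj t) = (np.erase t.2.2.2, acc ++ [[t.2.2.2, t.2.2.1]]) from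
            by simp [pvStepA, pvProj, hm, PySem.List.remove?_eq_some_erase np _ hm]]
      refine ih _ _ _ ?_
      intro s
      rcases eq_or_ne s t.2.2.2 with rfl | hne
      · rw [PySem.Dict.getD_modify_self, h, List.count_erase_self]
        omega
      · rw [PySem.Dict.getD_modify_of_ne _ _ _ hne, h, List.count_erase_of_ne hne]
    · have hc : np.count t.2.2.2 = 0 := List.count_eq_zero.mpr hm
      have hB : ¬ 0 < d.getD t.2.2.2 0 := by rw [h, hc]; simp
      rw [show pvStepB (d, acc) t = (d, acc) from by simp [pvStepB, hB],
          show pvStepA (np, acc) (pvProj t) = (np, acc) from by simp [pvStepA, pvProj, hm]]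
      exact ih np d acc h

def pvMembers (group1 : List (List String)) : List String :=
  (group1.filter (fun row => decide (row.length ≤ 1))).map (fun row => PySem.List.pyGetD row 0 "")

lemma pv_block_map_proj (group2 : List (List String)) (i : Int) :
    (group2.filter (fun row => decide (i < (row.length : Int)))).map
        (fun row => (PySem.List.pyGetD row 0 "", PySem.List.pyGetD row i ""))
      = (pvBlock group2 i).map pvProj := by
  rw [eq_comm]
  unfold pvBlock
  rw [List.map_filterMap]
  simp only [apply_ite (Option.map pvProj), Option.map_some, Option.map_none, pvProj]
  rw [pv_filterMap_enumerate_snd group2 0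
        (fun row => if i < (row.length : Int) then
          some (PySem.List.pyGetD row 0 "", PySem.List.pyGetD row i "") else none),
      pv_filterMap_ite_filter]

lemma pv_A_eq (group1 group2 : List (List String)) (m : Int) :
    match_no_preference group1 group2 m
      = ((pvOffersC group2 m).foldl (fun st t => pvStepA st (pvProj t)) (pvMembers group1, [])).2 := by
  simp only [match_no_preference]
  rw [PySem.List.foldl_append_ite, List.nil_append]
  have hmembers : (group1.filter
        (fun row => decide ((PySem.List.slice row (some 1) none).length = 0))).map
        (fun row => PySem.List.pyGetD row 0 "") = pvMembers group1 := by
    unfold pvMembers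
    congr 1
    apply List.filter_congr
    intro row _
    rw [decide_eq_decide, PySem.List.slice_from_one, List.length_tail]
    omega
  rw [hmembers]
  congr 1
  unfold pvOffersC
  rw [List.foldl_flatMap]
  apply PySem.List.foldl_congr_mem
  intro st i _
  rw [PySem.List.foldl_append_ite, List.nil_append, pv_block_map_proj group2 i, List.foldl_map]
  rfl

lemma pv_B_eq (group1 group2 : List (List String)) (m : Int) :
    match_no_preference_alt group1 group2 m
      = ((pvOffersC group2 m).foldl pvStepB (PySem.Dict.counter (pvMembers group1), [])).2 := by
  simp only [match_no_preference_alt]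
  rw [PySem.Dict.foldl_insert_getD_add_one_eq_counter]
  have h1 : (PySem.List.enumerate group2).foldl (fun acc jr =>
        (PySem.List.pyRange 1 (min ((jr.2.length : Int)) m) 1).foldl
          (fun acc2 i => acc2 ++
            [(i, jr.1, PySem.List.pyGetD jr.2 0 "", PySem.List.pyGetD jr.2 i "")]) acc) []
      = (PySem.List.enumerate group2).flatMap (fun jr =>
          (PySem.List.pyRange 1 m 1).filterMap (fun i =>
            if i < (jr.2.length : Int) then
              some (i, jr.1, PySem.List.pyGetD jr.2 0 "", PySem.List.pyGetD jr.2 i "")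
            else none)) := by
    simp only [PySem.List.foldl_append_singleton_eq_map]
    rw [PySem.List.foldl_append_eq_flatMap, List.nil_append]
    apply List.flatMap_congr
    intro jr _
    exact pv_range_min_map ((jr.2.length : Int)) m (Int.natCast_nonneg _) _
  have hperm := pv_transpose_perm (PySem.List.enumerate group2) (PySem.List.pyRange 1 m 1)
    (fun jr i => if i < (jr.2.length : Int) then
      some (i, jr.1, PySem.List.pyGetD jr.2 0 "", PySem.List.pyGetD jr.2 i "") else none)
  have hsorted : PySem.List.sorted ((PySem.List.enumerate group2).foldl (fun acc jr =>
        (PySem.List.pyRange 1 (min ((jr.2.length : Int)) m) 1).foldl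
          (fun acc2 i => acc2 ++
            [(i, jr.1, PySem.List.pyGetD jr.2 0 "", PySem.List.pyGetD jr.2 i "")]) acc) [])
        (fun t => toLex (t.1, t.2.1))
      = pvOffersC group2 m := by
    apply PySem.List.sorted_eq_of_perm_of_pairwise_lt
    · rw [h1]
      exact hperm.symm
    · have := pv_offers_pairwise group2 m
      simpa [pvKey] using this
  rw [hsorted]
  rfl

-- ===== VERDICT (by name: the statement is the Claim_ definition above) =====
theorem match_no_preference_spec : Claim_equal_match_no_preference := by
  intro group1 group2 max_to_scan _ _
  unfold Spec_match_no_preference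
  rw [pv_A_eq, pv_B_eq]
  exact (pv_consume (pvOffersC group2 max_to_scan) (pvMembers group1)
    (PySem.Dict.counter (pvMembers group1)) []
    (fun s => PySem.Dict.getD_counter (pvMembers group1) s)).symm
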